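-- pv_equiv track=rewrite | github.com/ndujesco/DSA | BigO/BigO.py | fun_challenge
-- ===== SOURCE A (Python) =====
-- def another_fn():
--     # does something
--     return
--
-- def fun_challenge(input):
--     a = 10 #O(1)
--     a = 50 + 3 #O(1)
--
--     for i in range(len(input)): #O(n)
--         another_fn() #O(n)
--         stranger = True #O(n)
--         a += 1 #O(n)
--     return a #O(1)
-- ===== SOURCE B (Python) =====
-- def fun_challenge(input):
--     return 53 + len(input)
-- ===== Notes on version B (the rewrite author's own statement) =====
-- stated objective: simpler
-- what changed: Replaces the O(n) accumulating loop (with its no-op helper call and dead variable) by the closed form 53 + len(input).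
import Mathlib
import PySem

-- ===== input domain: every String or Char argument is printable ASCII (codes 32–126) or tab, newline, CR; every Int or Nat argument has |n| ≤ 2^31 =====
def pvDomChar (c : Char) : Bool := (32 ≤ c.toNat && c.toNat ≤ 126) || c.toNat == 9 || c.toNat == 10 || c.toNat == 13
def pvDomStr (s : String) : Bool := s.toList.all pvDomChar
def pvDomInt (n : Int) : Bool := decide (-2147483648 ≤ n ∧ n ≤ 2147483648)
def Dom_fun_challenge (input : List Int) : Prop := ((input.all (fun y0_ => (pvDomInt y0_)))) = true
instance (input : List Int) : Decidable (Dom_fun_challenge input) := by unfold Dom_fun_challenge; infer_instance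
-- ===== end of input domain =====

-- ===== PORT A =====
-- literal port of A: a foldl over range(len(input)) accumulating a += 1 from a = 53
def fun_challenge (input : List Int) : Int :=
  (PySem.List.pyRange 0 (input.length : Int) 1).foldl (fun a _ => a + 1) 53

-- ===== PORT B =====
-- B: closed form, one honest line: 53 + len(input)
def fun_challenge_alt (input : List Int) : Int := 53 + (input.length : Int)

-- ===== PRECONDITION & SPEC =====
def Spec_fun_challenge (input : List Int) (out : Int) : Prop := out = fun_challenge_alt input
instance (input : List Int) (out : Int) : Decidable (Spec_fun_challenge input out) := by unfold Spec_fun_challenge; infer_instance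

-- ===== CLAIM (what is proved, stated in full; the proofs are below) =====
def Claim_equal_fun_challenge : Prop := ∀ (input : List Int), Dom_fun_challenge input → Spec_fun_challenge input (fun_challenge input)

-- ===== LEMMAS AND PROOFS =====

-- ===== VERDICT (by name: the statement is the Claim_ definition above) =====
theorem foldl_add_one (l : List Int) (a : Int) : l.foldl (fun a _ => a + 1) a = a + l.length := by
  induction l generalizing a with
  | nil => simp
  | cons x xs ih => simp [List.foldl, ih]; omega

theorem fun_challenge_spec : Claim_equal_fun_challenge := by
  intro input _
  unfold Spec_fun_challenge fun_challenge fun_challenge_alt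
  rw [foldl_add_one]
  simp [PySem.List.pyRange]
  intro h; simp [h]
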